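-- pv_equiv track=rewrite | github.com/Fakeidforservlet/Leetcode | 49-group-anagrams/group-anagrams.py | char_freq_count
-- ===== SOURCE A (Python) =====
-- def char_freq_count(s):
--     dic={}
--     for ch in s:
--         if ch in dic:
--             dic[ch]+=1
--         else:
--             dic[ch]=1
--     char_count_str=''
--     for char in sorted(dic.keys()):
--         char_count_str+=char+str(dic[char])
--     return char_count_str
-- ===== SOURCE B (Python) =====
-- def char_freq_count(s):
--     t = sorted(s)
--     parts = []
--     while t:
--         c = t[0]
--         k = 1
--         while k < len(t) and t[k] == c:
--             k += 1
--         parts.append(c + str(k))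
--         t = t[k:]
--     return ''.join(parts)
-- ===== Notes on version B (the rewrite author's own statement) =====
-- stated objective: alternative
-- what changed: B keeps no frequency dictionary: it sorts the string once and scans the sorted sequence front to back, emitting char+run-length for each maximal run of equal characters.
import Mathlib
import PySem

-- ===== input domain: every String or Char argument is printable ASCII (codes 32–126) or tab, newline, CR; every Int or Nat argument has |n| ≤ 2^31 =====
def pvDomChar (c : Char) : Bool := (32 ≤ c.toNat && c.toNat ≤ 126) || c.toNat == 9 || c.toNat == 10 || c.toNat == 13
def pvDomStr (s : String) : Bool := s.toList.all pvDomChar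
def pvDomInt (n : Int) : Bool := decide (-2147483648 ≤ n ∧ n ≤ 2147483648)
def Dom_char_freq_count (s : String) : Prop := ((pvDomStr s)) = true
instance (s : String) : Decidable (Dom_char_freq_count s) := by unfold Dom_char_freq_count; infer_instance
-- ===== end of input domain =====

-- B replaces A's char-frequency dictionary by a single sort-then-scan over runs of equal
-- characters (alternative algorithm, same exact output).


-- ===== PORT A =====
-- literal port of A: build a char→count dict in one pass, then fold over the sorted keys
-- appending char + str(count).
def char_freq_count (s : String) : String :=
  let dic := s.toList.foldl
    (fun d ch => if d.contains ch then d.insert ch (d.getD ch 0 + 1) else d.insert ch 1)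
    (PySem.Dict.empty : PySem.Dict Char Int)
  String.ofList ((PySem.List.sorted dic.keys (fun x => x)).foldl
    (fun acc ch => acc ++ ch :: PySem.Int.toChars (dic.getD ch 0)) [])

-- ===== PORT B =====
-- literal port of B's outer while loop: at each step the run of the leading character is
-- measured (inner while = takeWhile) and the rest (t = t[k:] = dropWhile) is processed next.
def pvRuns : List Char → List (List Char)
  | [] => []
  | c :: rest =>
      (c :: PySem.Int.toChars (((rest.takeWhile (· == c)).length + 1 : Nat) : Int)) ::
        pvRuns (rest.dropWhile (· == c))
termination_by l => l.length
decreasing_by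
  simp only [List.length_cons]
  exact Nat.lt_succ_of_le (List.length_dropWhile_le _ _)

def char_freq_count_alt (s : String) : String :=
  String.ofList (PySem.Chars.join [] (pvRuns (PySem.List.sorted s.toList (fun x => x))))

-- ===== PRECONDITION & SPEC =====
def Spec_char_freq_count (s : String) (out : String) : Prop := out = char_freq_count_alt s
instance (s : String) (out : String) : Decidable (Spec_char_freq_count s out) := by unfold Spec_char_freq_count; infer_instance

-- ===== CLAIM (what is proved, stated in full; the proofs are below) =====
def Claim_equal_char_freq_count : Prop := ∀ (s : String), Dom_char_freq_count s → Spec_char_freq_count s (char_freq_count s)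

-- ===== LEMMAS AND PROOFS =====

-- the first character of each run, i.e. the distinct characters of a sorted list in order
def pvFirsts : List Char → List Char
  | [] => []
  | c :: rest => c :: pvFirsts (rest.dropWhile (· == c))
termination_by l => l.length
decreasing_by
  simp only [List.length_cons]
  exact Nat.lt_succ_of_le (List.length_dropWhile_le _ _)

lemma pv_dict_eq_counter (l : List Char) :
    l.foldl (fun d ch => if d.contains ch then d.insert ch (d.getD ch 0 + 1) else d.insert ch 1)
      (PySem.Dict.empty : PySem.Dict Char Int) = PySem.Dict.counter l := by
  rw [← PySem.Dict.foldl_insert_getD_add_one_eq_counter]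
  congr 1
  funext d ch
  by_cases h : d.contains ch
  · simp [h]
  · simp only [Bool.not_eq_true] at h
    simp [h, PySem.Dict.getD_of_not_contains d 0 h]

lemma pv_dropWhile_gt (c : Char) (l : List Char) (h : List.Pairwise (· ≤ ·) l)
    (hlb : ∀ y ∈ l, c ≤ y) : ∀ x ∈ l.dropWhile (· == c), c < x := by
  have hsub := List.dropWhile_sublist (l := l) (· == c)
  have hp : List.Pairwise (· ≤ ·) (l.dropWhile (· == c)) := List.Pairwise.sublist hsub h
  cases hd : l.dropWhile (· == c) with
  | nil => simp
  | cons y ys =>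
    have hy : (y == c) = false := by
      have := List.head?_dropWhile_not (· == c) l
      rw [hd] at this; simpa using this
    have hymem : y ∈ l := hsub.mem (by rw [hd]; exact List.mem_cons_self)
    have hcy : c < y := lt_of_le_of_ne (hlb y hymem) (by simpa using (Ne.symm (by simpa using hy)))
    intro x hx
    rw [hd] at hp
    rcases List.mem_cons.1 hx with rfl | hx
    · exact hcy
    · exact lt_of_lt_of_le hcy ((List.pairwise_cons.1 hp).1 x hx)

lemma pv_main (l : List Char) (h : List.Pairwise (· ≤ ·) l) :
    pvRuns l = (pvFirsts l).map (fun c => c :: PySem.Int.toChars (l.count c))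
    ∧ List.Pairwise (· < ·) (pvFirsts l)
    ∧ ∀ x, x ∈ pvFirsts l ↔ x ∈ l := by
  induction l using pvFirsts.induct with
  | case1 => simp [pvRuns, pvFirsts]
  | case2 c rest ih =>
    rw [List.pairwise_cons] at h
    obtain ⟨hlb, hrest⟩ := h
    rw [pvRuns, pvFirsts]
    set t := rest.takeWhile (· == c) with ht
    set d := rest.dropWhile (· == c) with hdd
    have hsplit : t ++ d = rest := List.takeWhile_append_dropWhile
    have hdsorted : List.Pairwise (· ≤ ·) d :=
      List.Pairwise.sublist (List.dropWhile_sublist _) hrest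
    have hgt : ∀ x ∈ d, c < x := pv_dropWhile_gt c rest hrest hlb
    obtain ⟨ih1, ih2, ih3⟩ := ih hdsorted
    have htc : ∀ x ∈ t, x = c := by
      intro x hx
      have := List.mem_takeWhile_imp hx
      simpa using this
    have hcountc : (c :: rest).count c = t.length + 1 := by
      rw [List.count_cons_self, ← hsplit, List.count_append]
      have h1 : t.count c = t.length := by
        rw [List.count_eq_length]
        intro b hb; exact (htc b hb).symm
      have h2 : d.count c = 0 := by
        rw [List.count_eq_zero]
        intro hc; exact absurd (hgt c hc) (lt_irrefl c)
      omega
    have hcountd : ∀ x ∈ pvFirsts d, (c :: rest).count x = d.count x := by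
      intro x hx
      have hxd : x ∈ d := (ih3 x).1 hx
      have hxc : c < x := hgt x hxd
      rw [List.count_cons_of_ne hxc.ne, ← hsplit, List.count_append]
      have : t.count x = 0 := by
        rw [List.count_eq_zero]
        intro hc; exact absurd (htc x hc) (ne_of_gt hxc)
      omega
    refine ⟨?_, ?_, ?_⟩
    · rw [List.map_cons, hcountc, ih1]
      congr 1
      apply List.map_congr_left
      intro x hx
      rw [hcountd x hx]
    · rw [List.pairwise_cons]
      exact ⟨fun x hx => hgt x ((ih3 x).1 hx), ih2⟩
    · intro x
      simp only [List.mem_cons, ih3]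
      constructor
      · rintro (rfl | hx)
        · exact Or.inl rfl
        · exact Or.inr (by rw [← hsplit]; exact List.mem_append_right _ hx)
      · rintro (rfl | hx)
        · exact Or.inl rfl
        · rw [← hsplit] at hx
          rcases List.mem_append.1 hx with hx | hx
          · exact Or.inl (htc x hx)
          · exact Or.inr hx

lemma pv_join_nil (xs : List (List Char)) : PySem.Chars.join [] xs = xs.flatten := by
  show [].intercalate xs = xs.flatten
  rw [List.intercalate]
  induction xs with
  | nil => rfl
  | cons a t ih =>
    cases t with
    | nil => simp
    | cons b u => simpa using ih

-- ===== VERDICT (by name: the statement is the Claim_ definition above) =====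
theorem char_freq_count_spec : Claim_equal_char_freq_count := by
  intro s _
  unfold Spec_char_freq_count char_freq_count char_freq_count_alt
  rw [pv_dict_eq_counter]
  simp only [PySem.Dict.keys_counter, PySem.Dict.getD_counter]
  rw [PySem.List.foldl_append_eq_flatMap (fun ch => ch :: PySem.Int.toChars (s.toList.count ch)),
    pv_join_nil, List.nil_append]
  have hsl : List.Pairwise (· ≤ ·) (PySem.List.sorted s.toList (fun x => x)) :=
    PySem.List.sorted_pairwise s.toList (fun x => x)
  obtain ⟨h1, h2, h3⟩ := pv_main (PySem.List.sorted s.toList (fun x => x)) hsl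
  have hperm := PySem.List.sorted_perm s.toList (fun x => x) false
  have hK : PySem.List.sorted (PySem.Set.ofList s.toList) (fun x => x)
      = pvFirsts (PySem.List.sorted s.toList (fun x => x)) := by
    apply PySem.List.sorted_eq_of_perm_of_pairwise_lt
    · rw [List.perm_ext_iff_of_nodup (h2.imp ne_of_lt) (PySem.Set.nodup_ofList s.toList)]
      intro a
      rw [h3 a, PySem.Set.mem_ofList]
      exact hperm.mem_iff
    · exact h2
  rw [hK, h1, List.flatMap_def]
  have hmap :
      List.map (fun ch => ch :: PySem.Int.toChars ((s.toList.count ch : Int)))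
        (pvFirsts (PySem.List.sorted s.toList (fun x => x)))
      = List.map (fun c => c :: PySem.Int.toChars
          ((((PySem.List.sorted s.toList (fun x => x)).count c : Nat) : Int)))
        (pvFirsts (PySem.List.sorted s.toList (fun x => x))) :=
    List.map_congr_left (fun x _ => by rw [List.Perm.count_eq hperm])
  rw [hmap]
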